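-- pv_equiv track=rewrite | github.com/buseozgur/data-sudoku | sudoku.py | valid_group
-- ===== SOURCE A (Python) =====
-- def valid_group(values):
--     """
--     Return True if values contain exactly numbers 1-9 with no repetition.
--     """
--     if len(values) != 9:
--         return False
--
--     for v in values:
--         if type(v) is not int:
--             return False
--         if v <1 and v>9:
--             return False
--     return set(values) == set(range(1, 10))
-- ===== SOURCE B (Python) =====
-- def valid_group(values):
--     """
--     Return True if values contain exactly numbers 1-9 with no repetition.
--     """
--     return sorted(values) == list(range(1, 10))
-- ===== Notes on version B (the rewrite author's own statement) =====
-- stated objective: simpler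
-- what changed: Replaces the length-9 guard, the per-element loop and the hash-set comparison set(values) == set(range(1,10)) with a single positional comparison sorted(values) == list(range(1,10)), which also subsumes the length check.
import Mathlib
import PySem

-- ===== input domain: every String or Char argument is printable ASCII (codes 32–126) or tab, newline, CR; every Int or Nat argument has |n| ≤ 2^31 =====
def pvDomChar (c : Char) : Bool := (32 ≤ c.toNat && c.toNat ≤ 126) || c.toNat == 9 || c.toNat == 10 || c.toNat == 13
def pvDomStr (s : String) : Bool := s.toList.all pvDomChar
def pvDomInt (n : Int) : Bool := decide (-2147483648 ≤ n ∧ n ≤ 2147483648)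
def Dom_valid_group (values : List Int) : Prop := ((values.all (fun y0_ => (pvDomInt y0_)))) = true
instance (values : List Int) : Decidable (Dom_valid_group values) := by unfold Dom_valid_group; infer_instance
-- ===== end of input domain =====

-- B replaces A's length guard, per-element loop and set-equality test with a single
-- sorted-list positional comparison: simpler, same result on all integer lists.


-- ===== PORT A =====
-- the loop over values: 'type(v) is not int' is always False for Int inputs (the
-- declared element type), so only the (contradictory) 'v < 1 and v > 9' branch remains;
-- falling off the loop yields the set comparison set(values) == set(range(1, 10))
def validGroupLoop (values : List Int) : List Int → Bool
  | [] => PySem.Set.equal (PySem.Set.ofList values)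
            (PySem.Set.ofList (PySem.List.pyRange 1 10 1))
  | v :: rest =>
      if v < 1 ∧ v > 9 then false else validGroupLoop values rest

def valid_group (values : List Int) : Bool :=
  if values.length ≠ 9 then false
  else validGroupLoop values values

-- ===== PORT B =====
def valid_group_alt (values : List Int) : Bool :=
  PySem.List.sorted values (fun x => x) false == PySem.List.pyRange 1 10 1

-- ===== PRECONDITION & SPEC =====
def Spec_valid_group (values : List Int) (out : Bool) : Prop := out = valid_group_alt values
instance (values : List Int) (out : Bool) : Decidable (Spec_valid_group values out) := by unfold Spec_valid_group; infer_instance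

-- ===== CLAIM (what is proved, stated in full; the proofs are below) =====
def Claim_equal_valid_group : Prop := ∀ (values : List Int), Dom_valid_group values → Spec_valid_group values (valid_group values)

-- ===== LEMMAS AND PROOFS =====

-- the A-loop never fires its (contradictory) range test, so it always falls
-- through to the final set comparison
theorem validGroupLoop_eq (values l : List Int) :
    validGroupLoop values l =
      PySem.Set.equal (PySem.Set.ofList values)
        (PySem.Set.ofList (PySem.List.pyRange 1 10 1)) := by
  induction l with
  | nil => rfl
  | cons v rest ih =>
    simp only [validGroupLoop, ih]
    rw [if_neg (by omega)]

-- the heart of the equivalence: on length-9 lists, equal sets of values ↔ sorted = [1..9]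
theorem key_iff (values : List Int) (h9 : values.length = 9) :
    (PySem.Set.equal (PySem.Set.ofList values)
        (PySem.Set.ofList (PySem.List.pyRange 1 10 1)) = true) ↔
      PySem.List.sorted values (fun x => x) false = PySem.List.pyRange 1 10 1 := by
  have hnr : (PySem.List.pyRange 1 10 1).Nodup := PySem.List.nodup_pyRange_one 1 10
  have hlr : (PySem.List.pyRange 1 10 1).length = 9 := by
    rw [PySem.List.length_pyRange_one]; rfl
  constructor
  · intro hset
    have hmem : ∀ x : Int, x ∈ values ↔ x ∈ PySem.List.pyRange 1 10 1 := by
      intro x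
      have := (PySem.Set.equal_iff _ _).mp hset x
      simpa [PySem.Set.mem_ofList] using this
    -- pigeonhole: the nodup range subperm-embeds into values; equal lengths make it a perm
    have hsub : List.Subperm (PySem.List.pyRange 1 10 1) values :=
      List.subperm_of_subset hnr (fun x hx => (hmem x).mpr hx)
    have hperm : List.Perm (PySem.List.pyRange 1 10 1) values :=
      hsub.perm_of_length_le (by omega)
    exact PySem.List.sorted_eq_of_perm_of_pairwise_lt values (PySem.List.pyRange 1 10 1) (fun x => x) hperm
      (PySem.List.pairwise_lt_pyRange_one 1 10)
  · intro hsorted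
    have hperm : List.Perm values (PySem.List.pyRange 1 10 1) := by
      have := PySem.List.sorted_perm values (fun x => x) false
      rw [hsorted] at this
      exact this.symm
    refine (PySem.Set.equal_iff _ _).mpr ?_
    intro x
    simp only [PySem.Set.mem_ofList]
    exact ⟨fun hx => hperm.mem_iff.mp hx, fun hx => hperm.mem_iff.mpr hx⟩

-- ===== VERDICT (by name: the statement is the Claim_ definition above) =====
theorem valid_group_spec : Claim_equal_valid_group := by
  intro values _
  unfold Spec_valid_group valid_group valid_group_alt
  rw [validGroupLoop_eq]
  by_cases h9 : values.length = 9
  · rw [if_neg (by omega)]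
    rw [Bool.eq_iff_iff]
    simpa [beq_iff_eq] using key_iff values h9
  · rw [if_pos h9]
    symm
    rw [beq_eq_false_iff_ne]
    intro heq
    have := congrArg List.length heq
    rw [PySem.List.length_sorted, PySem.List.length_pyRange_one] at this
    omega
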